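-- pv_equiv track=rewrite | github.com/Yefym707/Game | src/client/scene_game.py | _simple_path
-- ===== SOURCE A (Python) =====
-- def _simple_path(start: tuple[int, int], end: tuple[int, int]) -> list[tuple[int, int]]:
--     x, y = start
--     tx, ty = end
--     path = []
--     while (x, y) != (tx, ty):
--         if x < tx:
--             x += 1
--         elif x > tx:
--             x -= 1
--         elif y < ty:
--             y += 1
--         elif y > ty:
--             y -= 1
--         path.append((x, y))
--         if len(path) > 100:
--             break
--     return path
-- ===== SOURCE B (Python) =====
-- def _simple_path(start: tuple[int, int], end: tuple[int, int]) -> list[tuple[int, int]]: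
--     x, y = start
--     tx, ty = end
--     sx = 1 if x <= tx else -1
--     nx = min(abs(tx - x), 101)
--     xleg = [(x + sx * k, y) for k in range(1, nx + 1)]
--     sy = 1 if y <= ty else -1
--     ny = min(abs(ty - y), 101 - nx)
--     yleg = [(tx, y + sy * k) for k in range(1, ny + 1)]
--     return xleg + yleg
-- ===== Notes on version B (the rewrite author's own statement) =====
-- stated objective: alternative
-- what changed: Replaces A's step-by-step walking while-loop (one cell per iteration, break past 100 appends) with a closed-form construction: the x-leg and y-leg are produced directly as two ranges whose lengths are capped so at most 101 cells are generated, then concatenated.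
import Mathlib
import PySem

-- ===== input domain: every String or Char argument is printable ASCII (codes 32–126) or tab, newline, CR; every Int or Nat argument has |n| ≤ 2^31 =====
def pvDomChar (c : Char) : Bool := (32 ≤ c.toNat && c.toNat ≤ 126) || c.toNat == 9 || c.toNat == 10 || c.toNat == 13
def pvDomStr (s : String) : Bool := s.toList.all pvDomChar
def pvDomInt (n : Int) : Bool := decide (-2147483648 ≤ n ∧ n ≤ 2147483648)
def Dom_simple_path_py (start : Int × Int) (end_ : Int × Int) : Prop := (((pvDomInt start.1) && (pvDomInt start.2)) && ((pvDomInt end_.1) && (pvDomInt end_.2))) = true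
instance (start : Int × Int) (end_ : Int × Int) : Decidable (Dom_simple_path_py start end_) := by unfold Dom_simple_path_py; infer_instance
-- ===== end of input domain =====

-- B replaces A's step-by-step walking loop by closed-form construction of the two legs
-- (an x-leg then a y-leg built from ranges, with lengths capped so at most 101 cells are produced);
-- objective: alternative decomposition (same O(1)-bounded output size, no simulation loop).

-- ===== PORT A =====
-- A-side helper: the if/elif chain of the loop body, as a pure step function
def pvStep (x y tx ty : Int) : Int × Int :=
  if x < tx then (x + 1, y)
  else if x > tx then (x - 1, y)
  else if y < ty then (x, y + 1)
  else if y > ty then (x, y - 1)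
  else (x, y)

-- A's while-loop; terminates because each pass appends one cell and the loop breaks past 100
def pvLoop (tx ty x y : Int) (path : List (Int × Int)) : List (Int × Int) :=
  if (x, y) = (tx, ty) then path
  else
    let q := pvStep x y tx ty
    let p := path ++ [q]
    if 100 < p.length then p
    else pvLoop tx ty q.1 q.2 p
termination_by 101 - path.length
decreasing_by simp only [p, q] at *; simp only [List.length_append, List.length_cons, List.length_nil] at *; omega

def simple_path_py (start : Int × Int) (end_ : Int × Int) : List (Int × Int) :=
  pvLoop end_.1 end_.2 start.1 start.2 []

-- ===== PORT B =====
def simple_path_py_alt (start : Int × Int) (end_ : Int × Int) : List (Int × Int) :=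
  let x := start.1
  let y := start.2
  let tx := end_.1
  let ty := end_.2
  let sx : Int := if x ≤ tx then 1 else -1
  let nx : Int := min |tx - x| 101
  let xleg := (PySem.List.pyRange 1 (nx + 1) 1).map (fun k => (x + sx * k, y))
  let sy : Int := if y ≤ ty then 1 else -1
  let ny : Int := min |ty - y| (101 - nx)
  let yleg := (PySem.List.pyRange 1 (ny + 1) 1).map (fun k => (tx, y + sy * k))
  xleg ++ yleg

-- ===== PRECONDITION & SPEC =====
def Spec_simple_path_py (start : Int × Int) (end_ : Int × Int) (out : List (Int × Int)) : Prop := out = simple_path_py_alt start end_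
instance (start : Int × Int) (end_ : Int × Int) (out : List (Int × Int)) : Decidable (Spec_simple_path_py start end_ out) := by unfold Spec_simple_path_py; infer_instance

-- ===== CLAIM (what is proved, stated in full; the proofs are below) =====
def Claim_equal_simple_path_py : Prop := ∀ (start : Int × Int) (end_ : Int × Int), Dom_simple_path_py start end_ → Spec_simple_path_py start end_ (simple_path_py start end_)

-- ===== LEMMAS AND PROOFS =====

-- the UNcapped pair of legs, in position form (proof-only helper)
def pvLegs (x y tx ty : Int) : List (Int × Int) :=
  ((PySem.List.pyRange (x + (if x ≤ tx then 1 else -1)) (tx + (if x ≤ tx then 1 else -1)) (if x ≤ tx then 1 else -1)).map (fun i => (i, y)))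
  ++ ((PySem.List.pyRange (y + (if y ≤ ty then 1 else -1)) (ty + (if y ≤ ty then 1 else -1)) (if y ≤ ty then 1 else -1)).map (fun j => (tx, j)))

lemma pvLegs_self (x y : Int) : pvLegs x y x y = [] := by
  simp [pvLegs, PySem.List.pyRange_one_eq_nil (le_refl (x+1)), PySem.List.pyRange_one_eq_nil (le_refl (y+1))]

lemma pvLegs_step (x y tx ty : Int) (h : (x, y) ≠ (tx, ty)) :
    pvLegs x y tx ty = pvStep x y tx ty :: pvLegs (pvStep x y tx ty).1 (pvStep x y tx ty).2 tx ty := by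
  rcases lt_trichotomy x tx with hx | hx | hx
  · -- x < tx : step right
    have hstep : pvStep x y tx ty = (x + 1, y) := by simp [pvStep, hx]
    rw [hstep]; simp only [pvLegs]
    rw [if_pos (le_of_lt hx), if_pos (by omega : x + 1 ≤ tx)]
    rw [PySem.List.pyRange_one_cons (by omega : x + 1 < tx + 1)]
    simp
  · -- x = tx : move in y
    subst hx
    have hy : y ≠ ty := fun hy => h (by simp [hy])
    rcases lt_or_gt_of_ne hy with hy | hy
    · -- y < ty : step up
      have hstep : pvStep x y x ty = (x, y + 1) := by
        simp only [pvStep, if_neg (lt_irrefl x), if_pos hy]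
      rw [hstep]; simp only [pvLegs]
      rw [if_pos (le_refl x), if_pos (le_of_lt hy), if_pos (by omega : y + 1 ≤ ty)]
      rw [PySem.List.pyRange_one_eq_nil (le_refl (x + 1)),
        PySem.List.pyRange_one_cons (by omega : y + 1 < ty + 1)]
      simp
    · -- y > ty : step down
      have hstep : pvStep x y x ty = (x, y - 1) := by
        simp only [pvStep, if_neg (lt_irrefl x), if_neg (by omega : ¬ y < ty), if_pos hy]
      rw [hstep]; simp only [pvLegs]
      rw [if_pos (le_refl x), if_neg (by omega : ¬ y ≤ ty)]
      by_cases h2 : y - 1 ≤ ty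
      · rw [if_pos h2, PySem.List.pyRange_neg_one_cons (by omega : ty + -1 < y + -1),
          PySem.List.pyRange_neg_one_eq_nil (by omega : y + -1 - 1 ≤ ty + -1),
          PySem.List.pyRange_one_eq_nil (le_refl (x + 1)),
          PySem.List.pyRange_one_eq_nil (by omega : ty + 1 ≤ y - 1 + 1)]
        simp [sub_eq_add_neg]
      · rw [if_neg h2, PySem.List.pyRange_neg_one_cons (by omega : ty + -1 < y + -1),
          (by ring : y + -1 - 1 = y - 1 + -1),
          PySem.List.pyRange_one_eq_nil (le_refl (x + 1))]
        simp [sub_eq_add_neg]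
  · -- x > tx : step left
    have hstep : pvStep x y tx ty = (x - 1, y) := by
      simp only [pvStep, if_neg (by omega : ¬ x < tx), if_pos hx]
    rw [hstep]; simp only [pvLegs]
    rw [if_neg (by omega : ¬ x ≤ tx)]
    by_cases h2 : x - 1 ≤ tx
    · have h3 : x - 1 = tx := by omega
      rw [if_pos h2, PySem.List.pyRange_neg_one_cons (by omega : tx + -1 < x + -1),
        PySem.List.pyRange_neg_one_eq_nil (by omega : x + -1 - 1 ≤ tx + -1),
        PySem.List.pyRange_one_eq_nil (by omega : tx + 1 ≤ x - 1 + 1)]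
      simp [sub_eq_add_neg]
    · rw [if_neg h2, PySem.List.pyRange_neg_one_cons (by omega : tx + -1 < x + -1),
        (by ring : x + -1 - 1 = x - 1 + -1)]
      simp [sub_eq_add_neg]

lemma pvLoop_eq (tx ty : Int) : ∀ (n : ℕ) (x y : Int) (path : List (Int × Int)),
    1 ≤ n → path.length + n = 101 →
    pvLoop tx ty x y path = path ++ (pvLegs x y tx ty).take n := by
  intro n
  induction n with
  | zero => omega
  | succ m ih =>
    intro x y path _ h2
    rw [pvLoop]
    by_cases he : (x, y) = (tx, ty)
    · rw [if_pos he]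
      have hx : x = tx := congrArg Prod.fst he
      have hy : y = ty := congrArg Prod.snd he
      subst hx; subst hy
      rw [pvLegs_self]
      simp
    · rw [if_neg he, pvLegs_step x y tx ty he]
      simp only [List.take_succ_cons, List.length_append, List.length_cons, List.length_nil]
      by_cases hl : 100 < path.length + 1
      · have hm : m = 0 := by omega
        subst hm
        rw [if_pos (by simpa using hl)]
        simp
      · rw [if_neg (by simpa using hl)]
        rw [ih (pvStep x y tx ty).1 (pvStep x y tx ty).2 (path ++ [pvStep x y tx ty])
          (by omega) (by simp; omega)]
        simp

lemma take_pos_leg {α : Type} (x tx : Int) (hx : x ≤ tx) (m : ℕ) (f : Int → α) :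
    ((PySem.List.pyRange (x + 1) (tx + 1) 1).map f).take m
      = (PySem.List.pyRange 1 (min (tx - x) (m : Int) + 1) 1).map (fun k => f (x + k)) := by
  rw [PySem.List.pyRange_one, PySem.List.pyRange_one, List.map_map, List.map_map,
    ← List.map_take, List.take_range]
  have h1 : min m (tx + 1 - (x + 1)).toNat = (min (tx - x) (m : Int) + 1 - 1).toNat := by omega
  rw [h1]
  apply List.map_congr_left
  intro k _
  simp only [Function.comp_apply]
  congr 1
  ring

lemma take_neg_leg {α : Type} (x tx : Int) (hx : tx < x) (m : ℕ) (f : Int → α) :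
    ((PySem.List.pyRange (x + -1) (tx + -1) (-1)).map f).take m
      = (PySem.List.pyRange 1 (min (x - tx) (m : Int) + 1) 1).map (fun k => f (x - k)) := by
  rw [PySem.List.pyRange_neg_one, PySem.List.pyRange_one, List.map_map, List.map_map,
    ← List.map_take, List.take_range]
  have h1 : min m (x + -1 - (tx + -1)).toNat = (min (x - tx) (m : Int) + 1 - 1).toNat := by omega
  rw [h1]
  apply List.map_congr_left
  intro k _
  simp only [Function.comp_apply]
  congr 1
  ring

lemma alt_eq_take (start end_ : Int × Int) :
    simple_path_py_alt start end_ = (pvLegs start.1 start.2 end_.1 end_.2).take 101 := by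
  obtain ⟨x, y⟩ := start
  obtain ⟨tx, ty⟩ := end_
  simp only [simple_path_py_alt, pvLegs]
  rw [List.take_append]
  by_cases hx : x ≤ tx
  · rw [if_pos hx, abs_of_nonneg (by omega : (0:Int) ≤ tx - x),
      take_pos_leg x tx hx 101 (fun i => (i, y)), List.length_map,
      PySem.List.length_pyRange_one,
      (by norm_num : ((101:ℕ):Int) = 101)]
    by_cases hy : y ≤ ty
    · rw [if_pos hy, abs_of_nonneg (by omega : (0:Int) ≤ ty - y),
        take_pos_leg y ty hy (101 - (tx + 1 - (x + 1)).toNat) (fun j => (tx, j)),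
        (by omega : ((101 - (tx + 1 - (x + 1)).toNat : ℕ) : Int) = 101 - min (tx - x) 101)]
      simp only [one_mul]
    · rw [if_neg hy, abs_of_neg (by omega : ty - y < 0),
        take_neg_leg y ty (by omega) (101 - (tx + 1 - (x + 1)).toNat) (fun j => (tx, j)),
        (by omega : ((101 - (tx + 1 - (x + 1)).toNat : ℕ) : Int) = 101 - min (tx - x) 101),
        (by omega : -(ty - y) = y - ty)]
      simp only [one_mul, neg_one_mul, sub_eq_add_neg]
  · rw [if_neg hx, abs_of_neg (by omega : tx - x < 0),
      take_neg_leg x tx (by omega) 101 (fun i => (i, y)), List.length_map,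
      PySem.List.length_pyRange_neg_one,
      (by norm_num : ((101:ℕ):Int) = 101),
      (by omega : -(tx - x) = x - tx)]
    by_cases hy : y ≤ ty
    · rw [if_pos hy, abs_of_nonneg (by omega : (0:Int) ≤ ty - y),
        take_pos_leg y ty hy (101 - (x + -1 - (tx + -1)).toNat) (fun j => (tx, j)),
        (by omega : ((101 - (x + -1 - (tx + -1)).toNat : ℕ) : Int) = 101 - min (x - tx) 101)]
      simp only [one_mul, neg_one_mul, sub_eq_add_neg]
    · rw [if_neg hy, abs_of_neg (by omega : ty - y < 0),
        take_neg_leg y ty (by omega) (101 - (x + -1 - (tx + -1)).toNat) (fun j => (tx, j)),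
        (by omega : ((101 - (x + -1 - (tx + -1)).toNat : ℕ) : Int) = 101 - min (x - tx) 101),
        (by omega : -(ty - y) = y - ty)]
      simp only [neg_one_mul, sub_eq_add_neg]

-- ===== VERDICT (by name: the statement is the Claim_ definition above) =====
theorem simple_path_py_spec : Claim_equal_simple_path_py := by
  intro s e _
  unfold Spec_simple_path_py simple_path_py
  rw [alt_eq_take, pvLoop_eq e.1 e.2 101 s.1 s.2 [] (by omega) (by simp)]
  simp
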